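-- pv_equiv track=rewrite | github.com/npnkhoi/Competitive-programming | VNOI/VNOI/I.py | check
-- ===== SOURCE A (Python) =====
-- def check(x, y):
--   for a in range(6, x // 4 + 1):
--     b_values = [0, 1, 2, 3, 4] if a == 6 else [a - 2]
--
--     for b in b_values:
--       rx = x - 4 * a
--       ry = y - 4 * b
--
--       if rx < 0 or ry < 0:
--         continue
--
--       if b == 0:
--         if rx == 0:
--           if ry <= 2 * a:
--             return True
--         else:
--           if ry - rx <= 2 * a and ry - rx >= 2:
--             return True
--       elif rx > ry:
--         if rx - ry <= 2 * b:
--           return True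
--       elif ry > rx:
--         if ry - rx <= 2 * a:
--           return True
--       elif rx == ry:
--         if rx != 1:
--           return True
--   return False
-- ===== SOURCE B (Python) =====
-- def check(x, y):
--     # a == 6: rx = x - 24, b runs over 0..4 -- five constant cases
--     if x // 4 >= 6:
--         rx = x - 24
--         for b in range(5):
--             ry = y - 4 * b
--             if rx < 0 or ry < 0:
--                 continue
--             if b == 0:
--                 if rx == 0:
--                     if ry <= 12:
--                         return True
--                 elif 2 <= ry - rx <= 12:
--                     return True
--             elif rx > ry:
--                 if rx - ry <= 2 * b:
--                     return True
--             elif ry > rx: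
--                 if ry - rx <= 12:
--                     return True
--             elif rx != 1:
--                 return True
--     # a >= 7, b = a - 2: closed-form interval test (ry - rx = y - x + 8 is constant)
--     amax = min(x // 4, (y + 8) // 4)
--     if amax < 7:
--         return False
--     d = y - x + 8
--     if d > 0:
--         return max(7, (d + 1) // 2) <= amax
--     if d < 0:
--         return max(7, (x - y - 3) // 2) <= amax
--     return amax >= 8 or x != 29
-- ===== Notes on version B (the rewrite author's own statement) =====
-- stated objective: faster
-- what changed: A scans every a from 6 to x//4; B checks the five constant a=6 cases directly and replaces the whole a>=7 scan (where b=a-2 makes ry-rx=y-x+8 constant) by a closed-form threshold test on a.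
import Mathlib
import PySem

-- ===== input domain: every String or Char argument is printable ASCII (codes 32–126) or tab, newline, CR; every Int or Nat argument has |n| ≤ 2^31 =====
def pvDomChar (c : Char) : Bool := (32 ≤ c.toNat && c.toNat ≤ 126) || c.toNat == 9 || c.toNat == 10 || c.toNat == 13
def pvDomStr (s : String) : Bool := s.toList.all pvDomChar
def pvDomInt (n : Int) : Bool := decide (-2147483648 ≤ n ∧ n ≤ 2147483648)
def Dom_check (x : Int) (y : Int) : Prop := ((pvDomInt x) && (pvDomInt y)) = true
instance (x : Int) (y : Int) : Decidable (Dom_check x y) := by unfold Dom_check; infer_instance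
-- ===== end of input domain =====

-- B replaces A's O(x) scan over a by the five constant a = 6 cases plus a closed-form
-- interval test for a ≥ 7 (there ry - rx = y - x + 8 is constant): objective = faster.

-- ===== PORT A =====
-- body of A's inner loop for one (a, b); 'continue' becomes false
def checkBody (x y a b : Int) : Bool :=
  let rx := x - 4 * a
  let ry := y - 4 * b
  if rx < 0 ∨ ry < 0 then false
  else if b = 0 then
    (if rx = 0 then decide (ry ≤ 2 * a)
     else decide (ry - rx ≤ 2 * a ∧ 2 ≤ ry - rx))
  else if ry < rx then decide (rx - ry ≤ 2 * b)
  else if rx < ry then decide (ry - rx ≤ 2 * a)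
  else if rx = ry then decide (rx ≠ 1)
  else false

def check (x : Int) (y : Int) : Bool :=
  (PySem.List.pyRange 6 (PySem.Int.floordiv x 4 + 1) 1).any (fun a =>
    ((if a = 6 then ([0, 1, 2, 3, 4] : List Int) else [a - 2]).any (fun b =>
      checkBody x y a b)))

-- ===== PORT B =====
-- body of B's b-loop (a fixed at 6, so 2*a = 12, rx = x - 24)
def altBody6 (x y b : Int) : Bool :=
  let rx := x - 24
  let ry := y - 4 * b
  if rx < 0 ∨ ry < 0 then false
  else if b = 0 then
    (if rx = 0 then decide (ry ≤ 12)
     else decide (2 ≤ ry - rx ∧ ry - rx ≤ 12))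
  else if ry < rx then decide (rx - ry ≤ 2 * b)
  else if rx < ry then decide (ry - rx ≤ 12)
  else decide (rx ≠ 1)

def check_alt (x : Int) (y : Int) : Bool :=
  if (if 6 ≤ PySem.Int.floordiv x 4 then
        ([0, 1, 2, 3, 4] : List Int).any (fun b => altBody6 x y b)
      else false) then true
  else
    let amax := min (PySem.Int.floordiv x 4) (PySem.Int.floordiv (y + 8) 4)
    if amax < 7 then false
    else
      let d := y - x + 8
      if 0 < d then decide (max 7 (PySem.Int.floordiv (d + 1) 2) ≤ amax)
      else if d < 0 then decide (max 7 (PySem.Int.floordiv (x - y - 3) 2) ≤ amax)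
      else decide (8 ≤ amax ∨ x ≠ 29)

-- ===== PRECONDITION & SPEC =====
def Spec_check (x : Int) (y : Int) (out : Bool) : Prop := out = check_alt x y
instance (x : Int) (y : Int) (out : Bool) : Decidable (Spec_check x y out) := by unfold Spec_check; infer_instance

-- ===== CLAIM (what is proved, stated in full; the proofs are below) =====
def Claim_equal_check : Prop := ∀ (x : Int) (y : Int), Dom_check x y → Spec_check x y (check x y)

-- ===== LEMMAS AND PROOFS =====

-- at a = 6 the two loop bodies coincide (2 * 6 = 12)
theorem body6_eq (x y b : Int) : checkBody x y 6 b = altBody6 x y b := by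
  simp only [checkBody, altBody6]
  norm_num
  split_ifs <;> rw [Bool.eq_iff_iff] <;> simp <;> omega

-- arithmetic characterisation of A's body at b = a - 2 for a >= 7
theorem bodyQ (x y a : Int) (ha : 7 ≤ a) :
    checkBody x y a (a - 2) = true ↔
      (0 ≤ x - 4 * a ∧ 0 ≤ y - 4 * a + 8 ∧
        ((y - x + 8 < 0 ∧ x - y - 8 ≤ 2 * a - 4) ∨
         (0 < y - x + 8 ∧ y - x + 8 ≤ 2 * a) ∨
         (y - x + 8 = 0 ∧ x - 4 * a ≠ 1))) := by
  simp only [checkBody]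
  split_ifs <;> simp_all <;> omega

-- A's result as an existential over the scan range
theorem check_iff (x y : Int) : check x y = true ↔
    ∃ a, 6 ≤ a ∧ a ≤ x / 4 ∧
      ((if a = 6 then ([0, 1, 2, 3, 4] : List Int) else [a - 2]).any (fun b =>
        checkBody x y a b)) = true := by
  have h4 : PySem.Int.floordiv x 4 = x / 4 :=
    PySem.Int.floordiv_eq_ediv_of_pos (by norm_num)
  unfold check
  rw [h4, List.any_eq_true]
  constructor
  · rintro ⟨a, hmem, hb⟩
    rw [PySem.List.mem_pyRange_one] at hmem
    exact ⟨a, hmem.1, by omega, hb⟩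
  · rintro ⟨a, h1, h2, hb⟩
    exact ⟨a, PySem.List.mem_pyRange_one.mpr ⟨h1, by omega⟩, hb⟩

-- B's result as a disjunction of closed-form conditions
theorem alt_iff (x y : Int) : check_alt x y = true ↔
    (6 ≤ x / 4 ∧ (([0, 1, 2, 3, 4] : List Int).any (fun b => altBody6 x y b)) = true) ∨
    (7 ≤ min (x / 4) ((y + 8) / 4) ∧
      ((0 < y - x + 8 ∧ max 7 ((y - x + 8 + 1) / 2) ≤ min (x / 4) ((y + 8) / 4)) ∨
       (y - x + 8 < 0 ∧ max 7 ((x - y - 3) / 2) ≤ min (x / 4) ((y + 8) / 4)) ∨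
       (y - x + 8 = 0 ∧ (8 ≤ min (x / 4) ((y + 8) / 4) ∨ x ≠ 29)))) := by
  have h4 : PySem.Int.floordiv x 4 = x / 4 :=
    PySem.Int.floordiv_eq_ediv_of_pos (by norm_num)
  have h4y : PySem.Int.floordiv (y + 8) 4 = (y + 8) / 4 :=
    PySem.Int.floordiv_eq_ediv_of_pos (by norm_num)
  have h2a : PySem.Int.floordiv (y - x + 8 + 1) 2 = (y - x + 8 + 1) / 2 :=
    PySem.Int.floordiv_eq_ediv_of_pos (by norm_num)
  have h2b : PySem.Int.floordiv (x - y - 3) 2 = (x - y - 3) / 2 :=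
    PySem.Int.floordiv_eq_ediv_of_pos (by norm_num)
  unfold check_alt
  simp only [h4, h4y, h2a, h2b]
  set q : Bool := ([0, 1, 2, 3, 4] : List Int).any (fun b => altBody6 x y b) with hq
  clear_value q
  clear hq
  cases q <;> split_ifs <;> simp_all <;> omega

theorem check_eq (x y : Int) : check x y = check_alt x y := by
  rw [Bool.eq_iff_iff, check_iff, alt_iff]
  constructor
  · rintro ⟨a, h6, hm, hb⟩
    by_cases ha6 : a = 6
    · subst ha6
      left
      refine ⟨hm, ?_⟩
      have hb' : (([0, 1, 2, 3, 4] : List Int).any fun b => checkBody x y 6 b) = true := by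
        simpa using hb
      simpa only [body6_eq] using hb'
    · have ha7 : 7 ≤ a := by omega
      simp only [if_neg ha6, List.any_eq_true, List.mem_singleton] at hb
      obtain ⟨b, hbmem, hcb⟩ := hb
      subst hbmem
      rw [bodyQ x y a ha7] at hcb
      right
      omega
  · rintro (⟨h6, hq⟩ | ⟨hmin, hdis⟩)
    · refine ⟨6, by omega, h6, ?_⟩
      have : (([0, 1, 2, 3, 4] : List Int).any fun b => checkBody x y 6 b) = true := by
        simpa only [body6_eq] using hq
      simpa using this
    · -- construct the witness a for the a >= 7 region
      have hwit : ∃ a : Int, 7 ≤ a ∧ a ≤ x / 4 ∧ a ≤ (y + 8) / 4 ∧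
          ((y - x + 8 < 0 ∧ x - y - 8 ≤ 2 * a - 4) ∨
           (0 < y - x + 8 ∧ y - x + 8 ≤ 2 * a) ∨
           (y - x + 8 = 0 ∧ x - 4 * a ≠ 1)) := by
        rcases hdis with ⟨hd, hle⟩ | ⟨hd, hle⟩ | ⟨hd, h0⟩
        · exact ⟨max 7 ((y - x + 8 + 1) / 2), by omega, by omega, by omega, by omega⟩
        · exact ⟨max 7 ((x - y - 3) / 2), by omega, by omega, by omega, by omega⟩
        · by_cases hx29 : x = 29
          · exact ⟨8, by omega, by omega, by omega, by omega⟩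
          · exact ⟨7, by omega, by omega, by omega, by omega⟩
      obtain ⟨a, ha7, hax, hay, hcond⟩ := hwit
      refine ⟨a, by omega, hax, ?_⟩
      rw [if_neg (by omega : ¬a = 6)]
      simp only [List.any_eq_true, List.mem_singleton]
      exact ⟨a - 2, rfl, (bodyQ x y a ha7).mpr (by omega)⟩

-- ===== VERDICT (by name: the statement is the Claim_ definition above) =====
theorem check_spec : Claim_equal_check := by
  intro x y _
  unfold Spec_check
  exact check_eq x y
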